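-- pv_equiv track=rewrite | github.com/yunan4nlp/pdtb_extract_args | main.py | ch2word
-- ===== SOURCE A (Python) =====
-- def ch2word(chs, ch_labels):
--     sents = []
--     sent_labels = []
--
--     ch_length = len(chs)
--     words = []
--     labels = []
--     for idx in range(ch_length):
--         ch = chs[idx]
--         label = ch_labels[idx]
--         if ch == ' ':
--             if len(words) == 0: continue
--             sents.append(words)
--             sent_labels.append(labels)
--             words = []
--             labels = []
--         else:
--             words.append(ch)
--             labels.append(label)
--
--     if len(words) > 0:
--         sents.append(words)
--         sent_labels.append(labels)
--     return sents, sent_labels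
-- ===== SOURCE B (Python) =====
-- def ch2word(chs, ch_labels):
--     # Two-pointer run scan: skip spaces, find each maximal non-space run [i:j),
--     # and slice the word and its labels out in one go.
--     sents = []
--     sent_labels = []
--     n = len(chs)
--     i = 0
--     while i < n:
--         if chs[i] == ' ':
--             i += 1
--             continue
--         j = i
--         while j < n and chs[j] != ' ':
--             j += 1
--         sents.append(chs[i:j])
--         sent_labels.append(ch_labels[i:j])
--         i = j
--     return sents, sent_labels
-- ===== Notes on version B (the rewrite author's own statement) =====
-- stated objective: alternative
-- what changed: Replaces A's single pass that grows word/label accumulators character by character and flushes them on spaces with a two-pointer run scan that skips spaces and slices each maximal non-space run (word and labels) out directly.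
import Mathlib
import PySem

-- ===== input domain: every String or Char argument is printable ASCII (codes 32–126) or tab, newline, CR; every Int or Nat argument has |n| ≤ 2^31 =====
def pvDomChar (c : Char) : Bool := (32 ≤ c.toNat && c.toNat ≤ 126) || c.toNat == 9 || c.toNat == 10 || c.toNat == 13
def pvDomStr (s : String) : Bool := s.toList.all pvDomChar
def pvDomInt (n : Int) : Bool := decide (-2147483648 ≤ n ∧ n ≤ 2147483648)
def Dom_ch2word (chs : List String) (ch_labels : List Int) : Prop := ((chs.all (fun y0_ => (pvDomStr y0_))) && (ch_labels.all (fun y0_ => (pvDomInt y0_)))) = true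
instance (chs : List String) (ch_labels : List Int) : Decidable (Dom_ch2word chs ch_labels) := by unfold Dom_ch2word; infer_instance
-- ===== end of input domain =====

-- One honest line: B replaces A's accumulate-and-flush single pass by a two-pointer
-- run scan that slices each maximal non-space run out of chs/ch_labels (alternative
-- decomposition, same cost); return values agree whenever A returns (Pre_).

-- ===== PORT A =====
-- state: (sents, (sent_labels, (words, labels))); pyGetD is exact here because
-- idx ∈ [0, len chs) and Pre_ guarantees len chs ≤ len ch_labels (else Python raises IndexError).
def ch2word (chs : List String) (ch_labels : List Int) : List (List String) × List (List Int) :=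
  let st := (PySem.List.pyRange 0 chs.length 1).foldl
    (fun (st : List (List String) × List (List Int) × List String × List Int) idx =>
      let ch := PySem.List.pyGetD chs idx ""
      let label := PySem.List.pyGetD ch_labels idx 0
      if ch = " " then
        if st.2.2.1.length = 0 then st
        else (st.1 ++ [st.2.2.1], st.2.1 ++ [st.2.2.2], [], [])
      else (st.1, st.2.1, st.2.2.1 ++ [ch], st.2.2.2 ++ [label]))
    ([], [], [], [])
  if st.2.2.1.length > 0 then (st.1 ++ [st.2.2.1], st.2.1 ++ [st.2.2.2])
  else (st.1, st.2.1)

-- ===== PORT B =====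
-- inner while loop of Source B: advance j while j < n and chs[j] != ' '
def bScan (chs : List String) (n j : Nat) : Nat :=
  if j < n ∧ ¬ chs.getD j "" = " " then bScan chs n (j + 1) else j
  termination_by n - j

theorem bScan_ge (chs : List String) (n j : Nat) : j ≤ bScan chs n j := by
  unfold bScan
  split
  · exact le_trans (Nat.le_succ j) (bScan_ge chs n (j + 1))
  · exact le_refl j
  termination_by n - j
  decreasing_by omega

-- outer while loop of Source B, with the accumulators sents / sent_labels
def bLoop (chs : List String) (ch_labels : List Int) (n i : Nat)
    (sents : List (List String)) (sent_labels : List (List Int)) :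
    List (List String) × List (List Int) :=
  if _h : i < n then
    if chs.getD i "" = " " then bLoop chs ch_labels n (i + 1) sents sent_labels
    else
      let j := bScan chs n i
      bLoop chs ch_labels n j
        (sents ++ [PySem.List.slice chs (some (i : Int)) (some (j : Int))])
        (sent_labels ++ [PySem.List.slice ch_labels (some (i : Int)) (some (j : Int))])
  else (sents, sent_labels)
  termination_by n - i
  decreasing_by
  · omega
  · have h1 : i + 1 ≤ bScan chs n (i + 1) := bScan_ge chs n (i + 1)
    have h2 : bScan chs n i = bScan chs n (i + 1) := by
      rw [bScan]; simp_all
    omega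

def ch2word_alt (chs : List String) (ch_labels : List Int) : List (List String) × List (List Int) :=
  bLoop chs ch_labels chs.length 0 [] []

-- ===== PRECONDITION & SPEC =====
-- Pre_ excludes exactly the inputs with len(ch_labels) < len(chs), on which A raises IndexError.
def Pre_ch2word (chs : List String) (ch_labels : List Int) : Prop :=
  chs.length ≤ ch_labels.length
instance (chs : List String) (ch_labels : List Int) : Decidable (Pre_ch2word chs ch_labels) := by
  unfold Pre_ch2word; infer_instance

def pvWitness_ch2word : List String × List Int := (["a", " ", "b", "c"], [1, 2, 3, 4])

def Spec_ch2word (chs : List String) (ch_labels : List Int) (out : List (List String) × List (List Int)) : Prop := out = ch2word_alt chs ch_labels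
instance (chs : List String) (ch_labels : List Int) (out : List (List String) × List (List Int)) : Decidable (Spec_ch2word chs ch_labels out) := by unfold Spec_ch2word; infer_instance

-- ===== CLAIM (what is proved, stated in full; the proofs are below) =====
def Claim_equal_ch2word : Prop := ∀ (chs : List String) (ch_labels : List Int), Dom_ch2word chs ch_labels → Pre_ch2word chs ch_labels → Spec_ch2word chs ch_labels (ch2word chs ch_labels)


-- ===== LEMMAS AND PROOFS =====

-- A's loop body, on one character/label
def aStep (st : List (List String) × List (List Int) × List String × List Int)
    (ch : String) (label : Int) :
    List (List String) × List (List Int) × List String × List Int :=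
  if ch = " " then
    if st.2.2.1.length = 0 then st
    else (st.1 ++ [st.2.2.1], st.2.1 ++ [st.2.2.2], [], [])
  else (st.1, st.2.1, st.2.2.1 ++ [ch], st.2.2.2 ++ [label])

-- A's final words-flush
def aFin (st : List (List String) × List (List Int) × List String × List Int) :
    List (List String) × List (List Int) :=
  if st.2.2.1.length > 0 then (st.1 ++ [st.2.2.1], st.2.1 ++ [st.2.2.2])
  else (st.1, st.2.1)

-- A's loop as a structural recursion over the two lists in parallel
def twoFold (st : List (List String) × List (List Int) × List String × List Int) :
    List String → List Int → List (List String) × List (List Int) × List String × List Int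
  | [], _ => st
  | c :: cs, ls => twoFold (aStep st c (ls.headD 0)) cs (ls.drop 1)

-- the value of A's loop-plus-flush given pending word w / labels l
def aRun (w : List String) (l : List Int) :
    List String → List Int → List (List String) × List (List Int)
  | [], _ => if w.length = 0 then ([], []) else ([w], [l])
  | c :: cs, ls =>
    if c = " " then
      if w.length = 0 then aRun [] [] cs (ls.drop 1)
      else
        let r := aRun [] [] cs (ls.drop 1)
        (w :: r.1, l :: r.2)
    else aRun (w ++ [c]) (l ++ [ls.headD 0]) cs (ls.drop 1)

theorem headD_eq_getD (ls : List Int) (k : Nat) (d : Int) :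
    (ls.drop k).headD d = ls.getD k d := by
  have h1 : (ls.drop k).headD d = (ls.drop k)[0]?.getD d := by
    cases ls.drop k <;> simp
  rw [h1, List.getElem?_drop, List.getD_eq_getElem?_getD, Nat.add_zero]

theorem fold_pyRange (chs : List String) (ls : List Int) (hlen : chs.length ≤ ls.length) :
    ∀ (k : Nat) (st : List (List String) × List (List Int) × List String × List Int),
    List.foldl
      (fun st idx => aStep st (PySem.List.pyGetD chs idx "") (PySem.List.pyGetD ls idx 0))
      st (PySem.List.pyRange (k : Int) (chs.length : Int) 1)
      = twoFold st (chs.drop k) (ls.drop k) := by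
  intro k st
  by_cases hk : k < chs.length
  · rw [PySem.List.pyRange_one_cons (by exact_mod_cast hk)]
    have hcast : ((k : Int) + 1) = ((k + 1 : Nat) : Int) := by push_cast; ring
    rw [List.foldl_cons, hcast, fold_pyRange chs ls hlen (k + 1)]
    have hdc : chs.drop k = chs[k] :: chs.drop (k + 1) := List.drop_eq_getElem_cons hk
    rw [hdc]
    show twoFold _ (chs.drop (k+1)) (ls.drop (k+1)) = twoFold _ (chs.drop (k+1)) ((ls.drop k).drop 1)
    have hgc : PySem.List.pyGetD chs (k : Int) "" = chs[k] := by
      rw [PySem.List.pyGetD_natCast, List.getD_eq_getElem chs "" hk]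
    have hgl : PySem.List.pyGetD ls (k : Int) 0 = (ls.drop k).headD 0 := by
      rw [PySem.List.pyGetD_natCast, headD_eq_getD]
    rw [hgc, hgl, List.drop_drop]
  · rw [PySem.List.pyRange_one_eq_nil (by exact_mod_cast Nat.le_of_not_lt hk)]
    rw [List.drop_eq_nil_of_le (Nat.le_of_not_lt hk)]
    rfl
  termination_by k => chs.length - k
  decreasing_by omega

theorem ch2word_eq_aFin (chs : List String) (ls : List Int) :
    ch2word chs ls = aFin (List.foldl
      (fun st idx => aStep st (PySem.List.pyGetD chs idx "") (PySem.List.pyGetD ls idx 0))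
      ([], [], [], []) (PySem.List.pyRange 0 (chs.length : Int) 1)) := rfl

theorem twoFold_aRun (chs : List String) :
    ∀ (ls : List Int) (S : List (List String)) (SL : List (List Int))
      (w : List String) (l : List Int), w.length = l.length →
    aFin (twoFold (S, SL, w, l) chs ls)
      = (S ++ (aRun w l chs ls).1, SL ++ (aRun w l chs ls).2) := by
  induction chs with
  | nil =>
    intro ls S SL w l _
    simp only [twoFold, aRun, aFin]
    by_cases hw : w.length = 0 <;> simp [hw]
  | cons c cs ih =>
    intro ls S SL w l hwl
    simp only [twoFold, aRun, aStep]
    by_cases hc : c = " "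
    · by_cases hw : w.length = 0
      · have hwnil : w = [] := List.length_eq_zero_iff.1 hw
        have hlnil : l = [] := List.length_eq_zero_iff.1 (by omega)
        subst hwnil; subst hlnil
        simp only [hc, hw, ite_true]
        rw [ih _ _ _ _ _ rfl]
      · simp only [hc, hw, ite_true, ite_false]
        rw [ih _ _ _ _ _ rfl]
        simp [List.append_assoc]
    · simp only [if_neg hc]
      rw [ih]
      simp [hwl]

theorem bScan_spec (chs : List String) :
    ∀ (j : Nat), bScan chs chs.length j
      = j + ((chs.drop j).takeWhile (fun c => !(c == " "))).length := by
  intro j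
  by_cases hj : j < chs.length
  · have hdc : chs.drop j = chs[j] :: chs.drop (j + 1) := List.drop_eq_getElem_cons hj
    have hg : chs.getD j "" = chs[j] := List.getD_eq_getElem chs "" hj
    by_cases hc : chs[j] = " "
    · rw [bScan, if_neg (fun hand => hand.2 (by rw [hg, hc])), hdc]
      simp [hc]
    · rw [bScan, if_pos ⟨hj, by rw [hg]; exact hc⟩, bScan_spec chs (j + 1), hdc]
      simp only [List.takeWhile_cons]
      rw [if_pos (by simp [hc])]
      simp only [List.length_cons]
      omega
  · rw [bScan, if_neg (fun hand => hj hand.1)]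
    rw [List.drop_eq_nil_of_le (Nat.le_of_not_lt hj)]
    simp
  termination_by j => chs.length - j
  decreasing_by omega

theorem aRun_prefix :
    ∀ (qs : List String) (w : List String) (l : List Int) (cs : List String) (ls : List Int),
    (∀ c ∈ qs, c ≠ " ") → qs.length ≤ ls.length →
    aRun w l (qs ++ cs) ls
      = aRun (w ++ qs) (l ++ ls.take qs.length) cs (ls.drop qs.length) := by
  intro qs
  induction qs with
  | nil => intro w l cs ls _ _; simp
  | cons q qs ih =>
    intro w l cs ls hns hlen
    obtain ⟨a, ls', rfl⟩ : ∃ a ls', ls = a :: ls' := by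
      cases ls with
      | nil => simp at hlen
      | cons a ls' => exact ⟨a, ls', rfl⟩
    have hq : q ≠ " " := hns q (List.mem_cons_self ..)
    simp only [List.cons_append, aRun, if_neg hq, List.headD_cons, List.drop_one, List.tail_cons]
    rw [ih (w ++ [q]) (l ++ [a]) cs ls'
      (fun c hc => hns c (List.mem_cons_of_mem _ hc)) (by simpa using Nat.le_of_succ_le_succ hlen)]
    simp [List.append_assoc, List.take_succ_cons, List.drop_succ_cons]

theorem dropWhile_head_not {p : String → Bool} :
    ∀ (l : List String) (c : String) (cs : List String),
    l.dropWhile p = c :: cs → p c = false := by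
  intro l
  induction l with
  | nil => intro c cs h; simp [List.dropWhile] at h
  | cons x xs ih =>
    intro c cs h
    rw [List.dropWhile_cons] at h
    by_cases hx : p x
    · exact ih c cs (by simpa [hx] using h)
    · simp only [hx] at h
      simp only [Bool.not_eq_true] at hx
      cases h
      simpa using hx

theorem aRun_flush (w : List String) (l : List Int) (hw : w.length ≠ 0)
    (R : List String) (ls : List Int)
    (hR : R = [] ∨ ∃ cs, R = " " :: cs) :
    aRun w l R ls = (w :: (aRun [] [] R ls).1, l :: (aRun [] [] R ls).2) := by
  rcases hR with rfl | ⟨cs, rfl⟩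
  · simp [aRun, hw]
  · simp [aRun, hw]

theorem bLoop_aRun (chs : List String) (ls : List Int) (hlen : chs.length ≤ ls.length) :
    ∀ (i : Nat) (S : List (List String)) (SL : List (List Int)),
    bLoop chs ls chs.length i S SL
      = (S ++ (aRun [] [] (chs.drop i) (ls.drop i)).1,
         SL ++ (aRun [] [] (chs.drop i) (ls.drop i)).2) := by
  intro i S SL
  by_cases hi : i < chs.length
  · have hdc : chs.drop i = chs[i] :: chs.drop (i + 1) := List.drop_eq_getElem_cons hi
    have hg : chs.getD i "" = chs[i] := List.getD_eq_getElem chs "" hi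
    have hil : i < ls.length := lt_of_lt_of_le hi hlen
    have hdl : ls.drop i = ls[i] :: ls.drop (i + 1) := List.drop_eq_getElem_cons hil
    have hg' : chs[i]?.getD "" = chs[i] := by rw [List.getElem?_eq_getElem hi]; rfl
    by_cases hc : chs[i] = " "
    · rw [bLoop, dif_pos hi,
        if_pos (by simp [List.getD_eq_getElem?_getD, hg', hc]), bLoop_aRun chs ls hlen (i + 1)]
      rw [hdc, hdl]
      simp [aRun, hc]
    · -- non-space run starting at i
      set p : String → Bool := fun c => !(c == " ") with hp
      set Q : List String := (chs.drop (i + 1)).takeWhile p with hQ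
      set R : List String := (chs.drop (i + 1)).dropWhile p with hRdef
      have hQR : chs.drop (i + 1) = Q ++ R := (List.takeWhile_append_dropWhile).symm
      have hscan : bScan chs chs.length i = i + 1 + Q.length := by
        rw [bScan, if_pos ⟨hi, by simp [List.getD_eq_getElem?_getD, hg', hc]⟩, bScan_spec]
      have hjgt : i < bScan chs chs.length i := by omega
      rw [bLoop, dif_pos hi, if_neg (by simp [List.getD_eq_getElem?_getD, hg', hc])]
      rw [bLoop_aRun chs ls hlen (bScan chs chs.length i)]
      -- identify the slices
      have hQlen : Q.length ≤ (ls.drop (i + 1)).length := by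
        have h1 : Q.length ≤ (chs.drop (i + 1)).length := by
          rw [hQR]; simp
        have h2 : (chs.drop (i + 1)).length ≤ (ls.drop (i + 1)).length := by
          simp; omega
        omega
      have hslc : PySem.List.slice chs (some (i : Int)) (some ((bScan chs chs.length i : Nat) : Int))
          = chs[i] :: Q := by
        rw [PySem.List.slice_natCast, hscan, hdc]
        have : i + 1 + Q.length - i = Q.length + 1 := by omega
        rw [this, List.take_succ_cons]
        congr 1
        rw [hQR]
        exact (List.prefix_iff_eq_take.1 (List.prefix_append Q R)).symm
      have hsll : PySem.List.slice ls (some (i : Int)) (some ((bScan chs chs.length i : Nat) : Int))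
          = ls[i] :: (ls.drop (i + 1)).take Q.length := by
        rw [PySem.List.slice_natCast, hscan, hdl]
        have : i + 1 + Q.length - i = Q.length + 1 := by omega
        rw [this, List.take_succ_cons]
      -- unfold the aRun on the right-hand side
      have hdropQ : (chs.drop (i + 1)).drop Q.length = R := by
        rw [hQR, List.drop_left]
      have hdropchsj : chs.drop (bScan chs chs.length i) = R := by
        rw [hscan, ← List.drop_drop, hdropQ]
      have hdroplsj : ls.drop (bScan chs chs.length i) = (ls.drop (i + 1)).drop Q.length := by
        rw [hscan, ← List.drop_drop]
      have hRshape : R = [] ∨ ∃ cs, R = " " :: cs := by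
        cases hRc : R with
        | nil => exact Or.inl rfl
        | cons r rs =>
          right
          have := dropWhile_head_not (chs.drop (i + 1)) r rs (by rw [← hRdef, hRc])
          simp only [hp, Bool.not_eq_false', beq_iff_eq] at this
          exact ⟨rs, by rw [this]⟩
      have hrhs : aRun [] [] (chs.drop i) (ls.drop i)
          = ((chs[i] :: Q) :: (aRun [] [] R ((ls.drop (i + 1)).drop Q.length)).1,
             (ls[i] :: (ls.drop (i + 1)).take Q.length) :: (aRun [] [] R ((ls.drop (i + 1)).drop Q.length)).2) := by
        rw [hdc, hdl]
        simp only [aRun, if_neg hc, List.headD_cons, List.drop_one, List.tail_cons, List.nil_append]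
        rw [hQR]
        rw [aRun_prefix Q [chs[i]] [ls[i]] R (ls.drop (i + 1))
          (fun c hcm => by
            have := List.mem_takeWhile_imp (hQ ▸ hcm)
            simpa [hp] using this) hQlen]
        simp only [List.singleton_append]
        rw [aRun_flush (chs[i] :: Q) (ls[i] :: (ls.drop (i+1)).take Q.length) (by simp) R _ hRshape]
      rw [hrhs, hslc, hsll, hdropchsj, hdroplsj]
      simp [List.append_assoc]
  · rw [bLoop, dif_neg hi]
    rw [List.drop_eq_nil_of_le (Nat.le_of_not_lt hi)]
    simp [aRun]
  termination_by i => chs.length - i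
  decreasing_by
  · omega
  · have := bScan_spec chs i
    omega

-- ===== VERDICT (by name: the statement is the Claim_ definition above) =====
theorem ch2word_spec : Claim_equal_ch2word := by
  intro chs ls _hdom hpre
  unfold Spec_ch2word
  have hlen : chs.length ≤ ls.length := hpre
  rw [ch2word_eq_aFin]
  have hfold := fold_pyRange chs ls hlen 0 ([], [], [], [])
  simp only [Nat.cast_zero, List.drop_zero] at hfold
  rw [hfold, twoFold_aRun chs ls [] [] [] [] rfl]
  unfold ch2word_alt
  rw [bLoop_aRun chs ls hlen 0, List.drop_zero, List.drop_zero]
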